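-- pv_equiv track=rewrite | github.com/CapStoneProject-KW/Algorithm-Study | 230406/speardragon/bj_18222.py | solution
-- ===== SOURCE A (Python) =====
-- def solution(x): # 6
--     # base case
--     if x == 0 or x == 1:
--         if x == 0: return 0
--         else: return 1
--     elif x%2!=0:
--         return 1-solution(x//2)
--     else:
--         return solution(x//2)
-- ===== SOURCE B (Python) =====
-- def solution(x): # 6
--     # Thue-Morse value: parity of the popcount of x's binary representation.
--     return bin(x).count('1') % 2
-- ===== Notes on version B (the rewrite author's own statement) =====
-- stated objective: simpler
-- what changed: Replaces the halving recursion by the closed form: solution(x) is the parity of the popcount of x (bin(x).count('1') % 2).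
-- outside the precondition, e.g. on solution(-1): A raises RecursionError, B returns 1
import Mathlib
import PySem

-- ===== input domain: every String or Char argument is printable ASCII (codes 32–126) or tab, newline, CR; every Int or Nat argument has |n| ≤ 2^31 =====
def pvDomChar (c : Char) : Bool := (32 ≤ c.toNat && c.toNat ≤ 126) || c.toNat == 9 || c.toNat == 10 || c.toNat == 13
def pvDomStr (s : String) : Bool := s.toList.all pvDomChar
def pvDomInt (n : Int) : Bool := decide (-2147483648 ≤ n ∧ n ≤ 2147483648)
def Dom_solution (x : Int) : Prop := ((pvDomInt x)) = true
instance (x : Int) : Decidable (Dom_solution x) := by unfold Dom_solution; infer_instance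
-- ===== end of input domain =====

-- B replaces A's halving recursion by the closed form "parity of popcount" (simpler).
-- Pre_ excludes negative x, on which A recurses forever (RecursionError).


-- ===== PORT A =====
-- A's recursion, written over the non-negative part of x (for x < 0 Python A does not
-- terminate; such x are excluded by Pre_solution).
def solutionGo : Nat → Int
  | 0 => 0
  | 1 => 1
  | (n+2) => if (n+2) % 2 ≠ 0 then 1 - solutionGo ((n+2)/2) else solutionGo ((n+2)/2)

def solution (x : Int) : Int := solutionGo x.toNat

-- ===== PORT B =====
-- bin(x).count('1') % 2, via the binary digit list (bin uses |x|, the '-' sign adds no '1').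
def solution_alt (x : Int) : Int := (((Nat.digits 2 x.natAbs).count 1) % 2 : Nat)

-- ===== PRECONDITION & SPEC =====
-- Pre_ excludes negative x: there Python A recurses forever (RecursionError), no value.
def Pre_solution (x : Int) : Prop := 0 ≤ x
instance (x : Int) : Decidable (Pre_solution x) := by unfold Pre_solution; infer_instance
def pvWitness_solution : Int := 5
def Spec_solution (x : Int) (out : Int) : Prop := out = solution_alt x
instance (x : Int) (out : Int) : Decidable (Spec_solution x out) := by unfold Spec_solution; infer_instance

-- ===== CLAIM (what is proved, stated in full; the proofs are below) =====
def Claim_equal_solution : Prop := ∀ (x : Int), Dom_solution x → Pre_solution x → Spec_solution x (solution x)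

-- ===== LEMMAS AND PROOFS =====
theorem solutionGo_eq (n : Nat) : solutionGo n = (((Nat.digits 2 n).count 1) % 2 : Nat) := by
  induction n using Nat.strong_induction_on with
  | _ n ih =>
    match n with
    | 0 => simp [solutionGo]
    | 1 => simp [solutionGo]
    | (m+2) =>
      have h2 : (m+2)/2 < m+2 := by omega
      have hrec := ih ((m+2)/2) h2
      have hd : Nat.digits 2 (m+2) = (m+2) % 2 :: Nat.digits 2 ((m+2)/2) :=
        Nat.digits_def' (by norm_num) (by omega)
      have hlt : ((Nat.digits 2 ((m+2)/2)).count 1) % 2 < 2 := Nat.mod_lt _ (by norm_num)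
      have step : solutionGo (m+2) =
          if (m+2) % 2 ≠ 0 then 1 - solutionGo ((m+2)/2) else solutionGo ((m+2)/2) := by simp [solutionGo]
      rw [step, hrec, hd]
      rcases Nat.even_or_odd (m+2) with he | ho
      · have hm : (m+2) % 2 = 0 := Nat.even_iff.mp he
        simp [hm, List.count_cons]
      · have hm : (m+2) % 2 = 1 := Nat.odd_iff.mp ho
        simp only [hm, List.count_cons]
        norm_num
        omega

-- ===== VERDICT (by name: the statement is the Claim_ definition above) =====
theorem solution_spec : Claim_equal_solution := by
  intro x _ hx
  unfold Spec_solution solution solution_alt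
  have h : x.natAbs = x.toNat := by unfold Pre_solution at hx; omega
  rw [h]
  exact solutionGo_eq x.toNat
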